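-- pv_equiv track=rewrite | github.com/ida/adi | adi.stepbysteps/adi/stepbysteps/subscriber.py | getNrsOfStr
-- ===== SOURCE A (Python) =====
-- def getNrsOfStr(string):
--     """ Returns a list of numbers, any digit following after a hash-character until a non-digit-char occurs, collects the nr, loops until str ends, can be severeal nrs:
--         Example: If the str is: 'Bla #27, blubb #12#43, foo #98 7, bar.', then [27,12,43,98] will be returned. Note: The last 7 is not counted, as separated if whitespace (=not a nr).
--     """
--     valids = ['0','1','2','3','4','5','6','7','8','9']
--     nrs = []
--     nr = ''
--     IN_NR = False
--     i = 0
--     while i < len(string):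
--         char = string[i]
--         if IN_NR and char not in valids or char is '#':
--             IN_NR = False
--             if nr is not '':
--                 nrs.append(nr)
--                 nr = ''
--         if char is '#':
--             IN_NR = True
--         if IN_NR and char is not '#':
--             nr += char
--         i += 1
--     if nr is not '':
--         nrs.append(nr)
--         nr = ''
--     return nrs
-- ===== SOURCE B (Python) =====
-- import re
--
-- def getNrsOfStr(string):
--     return re.findall(r'#([0-9]+)', string)
-- ===== Notes on version B (the rewrite author's own statement) =====
-- stated objective: idiomatic
-- what changed: The explicit while-loop character state machine is replaced by a single regular-expression extraction re.findall(r'#([0-9]+)', string), capturing every nonempty ASCII-digit run immediately following a hash character.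
import Mathlib
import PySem

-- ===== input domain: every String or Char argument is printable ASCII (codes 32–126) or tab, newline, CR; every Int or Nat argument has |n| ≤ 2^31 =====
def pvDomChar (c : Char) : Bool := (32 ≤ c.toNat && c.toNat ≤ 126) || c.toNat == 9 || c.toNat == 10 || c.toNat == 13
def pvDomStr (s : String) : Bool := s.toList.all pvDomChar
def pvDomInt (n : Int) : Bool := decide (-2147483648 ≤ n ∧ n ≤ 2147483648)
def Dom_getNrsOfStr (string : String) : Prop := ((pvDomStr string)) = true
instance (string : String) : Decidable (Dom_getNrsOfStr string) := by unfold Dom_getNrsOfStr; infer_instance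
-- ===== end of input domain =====

-- B replaces A's while-loop state machine by a regex-style extraction of '#'-prefixed digit runs (idiomatic; same cost).
-- ===== PORT A =====
def pvValids : List Char := ['0','1','2','3','4','5','6','7','8','9']

def pvAStep (st : List String × List Char × Bool) (c : Char) : List String × List Char × Bool :=
  let nrs := st.1
  let nr := st.2.1
  let inNr := st.2.2
  -- if IN_NR and char not in valids or char is '#':
  let (nrs, nr, inNr) :=
    if (inNr && !(pvValids.contains c)) || c == '#' then
      if nr ≠ [] then (nrs ++ [String.ofList nr], ([] : List Char), false) else (nrs, nr, false)
    else (nrs, nr, inNr)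
  -- if char is '#':
  let inNr := if c == '#' then true else inNr
  -- if IN_NR and char is not '#':
  let nr := if inNr && !(c == '#') then nr ++ [c] else nr
  (nrs, nr, inNr)

def getNrsOfStr (string : String) : List String :=
  let st := string.toList.foldl pvAStep ([], [], false)
  if st.2.1 ≠ [] then st.1 ++ [String.ofList st.2.1] else st.1

-- ===== PORT B =====
-- hand port of re.findall(r'#([0-9]+)', string): scan for '#', take the longest digit run after it
def pvBScan : List Char → List String
  | [] => []
  | c :: rest =>
    if c = '#' then
      let digits := rest.takeWhile Char.isDigit
      if digits = [] then pvBScan rest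
      else String.ofList digits :: pvBScan (rest.dropWhile Char.isDigit)
    else pvBScan rest
termination_by l => l.length
decreasing_by
  all_goals simp
  all_goals first
    | omega
    | (have := List.length_dropWhile_le (p := Char.isDigit) (l := rest); omega)

def getNrsOfStr_alt (string : String) : List String := pvBScan string.toList

-- ===== PRECONDITION & SPEC =====
def Spec_getNrsOfStr (string : String) (out : List String) : Prop := out = getNrsOfStr_alt string
instance (string : String) (out : List String) : Decidable (Spec_getNrsOfStr string out) := by unfold Spec_getNrsOfStr; infer_instance

-- ===== CLAIM (what is proved, stated in full; the proofs are below) =====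
def Claim_equal_getNrsOfStr : Prop := ∀ (string : String), Dom_getNrsOfStr string → Spec_getNrsOfStr string (getNrsOfStr string)

-- ===== LEMMAS AND PROOFS =====

-- ===== VERDICT (by name: the statement is the Claim_ definition above) =====
lemma pvContains_eq_isDigit (c : Char) : pvValids.contains c = c.isDigit := by
  simp only [pvValids, List.contains_cons, List.contains_nil, Bool.or_false, Char.isDigit]
  rcases c with ⟨⟨⟨v, hv⟩⟩, h⟩
  rw [Bool.eq_iff_iff]
  simp only [Bool.or_eq_true, beq_iff_eq, Bool.and_eq_true, decide_eq_true_eq,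
    Char.ext_iff, UInt32.ext_iff, UInt32.le_iff_toNat_le]
  have e : ({ toBitVec := { toFin := ⟨v, hv⟩ } } : UInt32).toNat = v := rfl
  rw [e, show ('0').val.toNat = 48 from rfl, show ('1').val.toNat = 49 from rfl,
    show ('2').val.toNat = 50 from rfl, show ('3').val.toNat = 51 from rfl,
    show ('4').val.toNat = 52 from rfl, show ('5').val.toNat = 53 from rfl,
    show ('6').val.toNat = 54 from rfl, show ('7').val.toNat = 55 from rfl,
    show ('8').val.toNat = 56 from rfl, show ('9').val.toNat = 57 from rfl]
  omega

def pvFinish (st : List String × List Char × Bool) : List String :=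
  if st.2.1 ≠ [] then st.1 ++ [String.ofList st.2.1] else st.1

lemma pvBScan_hash (rest : List Char) :
    pvBScan ('#' :: rest) =
      (if rest.takeWhile Char.isDigit = [] then [] else [String.ofList (rest.takeWhile Char.isDigit)])
        ++ pvBScan (rest.dropWhile Char.isDigit) := by
  rw [pvBScan, if_pos rfl]
  split_ifs with h
  · have hd : rest.dropWhile Char.isDigit = rest := by
      rw [List.dropWhile_eq_self_iff]
      intro hl
      have := List.takeWhile_eq_nil_iff.mp h hl
      simpa using this
    simp [h, hd]
  · simp [h]

lemma pvBScan_ne (c : Char) (rest : List Char) (h : c ≠ '#') :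
    pvBScan (c :: rest) = pvBScan rest := by
  rw [pvBScan]
  simp [h]

lemma pvMem_iff (c : Char) : (c ∈ pvValids) ↔ c.isDigit = true := by
  rw [← pvContains_eq_isDigit]; simp

lemma pvStepA_false (nrs : List String) (c : Char) :
    pvAStep (nrs, [], false) c = if c = '#' then (nrs, [], true) else (nrs, [], false) := by
  by_cases hc : c = '#' <;> simp [pvAStep, hc]

lemma pvStepA_true (nrs : List String) (d : List Char) (c : Char) :
    pvAStep (nrs, d, true) c =
      if c = '#' then ((if d ≠ [] then nrs ++ [String.ofList d] else nrs), [], true)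
      else if c.isDigit then (nrs, d ++ [c], true)
      else ((if d ≠ [] then nrs ++ [String.ofList d] else nrs), [], false) := by
  by_cases hc : c = '#' <;> by_cases hdig : c.isDigit <;> by_cases hd : d = [] <;>
    simp_all [pvAStep, pvMem_iff]

lemma pvMain (l : List Char) :
    (∀ nrs, pvFinish (l.foldl pvAStep (nrs, [], false)) = nrs ++ pvBScan l) ∧
    (∀ nrs d, pvFinish (l.foldl pvAStep (nrs, d, true)) =
      nrs ++ (if d ++ l.takeWhile Char.isDigit = [] then []
              else [String.ofList (d ++ l.takeWhile Char.isDigit)])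
          ++ pvBScan (l.dropWhile Char.isDigit)) := by
  induction l with
  | nil =>
    constructor
    · intro nrs; simp [pvFinish, pvBScan]
    · intro nrs d
      by_cases hd : d = [] <;> simp [pvFinish, pvBScan, hd]
  | cons c rest ih =>
    obtain ⟨ihF, ihT⟩ := ih
    constructor
    · intro nrs
      simp only [List.foldl_cons, pvStepA_false]
      by_cases hc : c = '#'
      · subst hc
        rw [if_pos rfl, ihT nrs [], pvBScan_hash]
        simp
      · rw [if_neg hc, ihF, pvBScan_ne c rest hc]
    · intro nrs d
      simp only [List.foldl_cons, pvStepA_true]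
      by_cases hc : c = '#'
      · subst hc
        rw [if_pos rfl, ihT _ []]
        have h9 : Char.isDigit '#' = false := rfl
        simp only [List.takeWhile_cons, List.dropWhile_cons, h9]
        by_cases hd : d = [] <;> simp [hd, pvBScan_hash]
      · by_cases hdig : c.isDigit
        · rw [if_neg hc, if_pos hdig, ihT nrs (d ++ [c])]
          simp [hdig]
        · rw [if_neg hc, if_neg hdig, ihF]
          by_cases hd : d = [] <;>
            simp [hdig, hd, pvBScan_ne c rest hc]

theorem getNrsOfStr_spec : Claim_equal_getNrsOfStr := by
  intro s _
  unfold Spec_getNrsOfStr getNrsOfStr getNrsOfStr_alt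
  simpa [pvFinish] using (pvMain s.toList).1 []
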